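-- pv_equiv track=rewrite | github.com/dkenward/libgf2 | libgf2/gf2.py | _calculateCofactors
-- ===== SOURCE A (Python) =====
-- def _calculateCofactors(factors, multiplicity=None):
--     """
--     given a vector of factors V, and multiplicity R
--     calculate vector V' such that the element-by-element
--     product of V and V' is a vector of equal elements P
--     where P is the product of all factors V^R.
--
--     In other words, each element of V' is the product of
--     all elements of V^R, except for the element in the corresponding position,
--     where V^(R-1) is used.
--
--     The multiplicity vector, if not provided, is set to all ones.
--
--     for example: if V = [2,3,5,7] and R = [1,1,1,1]
--                  then V' = [105, 70, 42, 30] and P = 210.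
--
--     If V = [2,3,5,7] and R = [2,1,2,1]
--     then V' = [1050, 700, 420, 300] and P = 2100.
--     """
--     n = len(factors)
--     if multiplicity is None:
--         multiplicity = [1]*n
--     cofactors = [1]*n
--     for (i,factor) in enumerate(factors):
--         r = multiplicity[i]
--         fdiag = factor**(r-1)
--         fnondiag = fdiag*factor
--         cofactors = [x * (fnondiag if i != j else fdiag)
--                           for (j,x) in enumerate(cofactors)]
--     return tuple(cofactors)
-- ===== SOURCE B (Python) =====
-- def _calculateCofactors(factors, multiplicity=None):
--     n = len(factors)
--     if multiplicity is None:
--         multiplicity = [1] * n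
--     powers = [f ** r for f, r in zip(factors, multiplicity)]
--     prefix = [1]
--     for p in powers:
--         prefix.append(prefix[-1] * p)
--     suffix = [1]
--     for p in reversed(powers):
--         suffix.append(suffix[-1] * p)
--     suffix.reverse()
--     return tuple(prefix[j] * suffix[j + 1] * factors[j] ** (multiplicity[j] - 1)
--                  for j in range(n))
-- ===== Notes on version B (the rewrite author's own statement) =====
-- stated objective: faster
-- what changed: Replaces A's loop that rebuilds the whole cofactor list once per factor (O(n^2) multiplications) with one pass computing prefix and suffix products of factor**multiplicity, so cofactor[j] = prefix[j]*suffix[j+1]*factors[j]**(multiplicity[j]-1).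
-- outside the precondition, e.g. on _calculateCofactors([2, 3], [0, 1]): A returns (1.5, 1.0), B returns (1.5, 1)
import Mathlib
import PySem

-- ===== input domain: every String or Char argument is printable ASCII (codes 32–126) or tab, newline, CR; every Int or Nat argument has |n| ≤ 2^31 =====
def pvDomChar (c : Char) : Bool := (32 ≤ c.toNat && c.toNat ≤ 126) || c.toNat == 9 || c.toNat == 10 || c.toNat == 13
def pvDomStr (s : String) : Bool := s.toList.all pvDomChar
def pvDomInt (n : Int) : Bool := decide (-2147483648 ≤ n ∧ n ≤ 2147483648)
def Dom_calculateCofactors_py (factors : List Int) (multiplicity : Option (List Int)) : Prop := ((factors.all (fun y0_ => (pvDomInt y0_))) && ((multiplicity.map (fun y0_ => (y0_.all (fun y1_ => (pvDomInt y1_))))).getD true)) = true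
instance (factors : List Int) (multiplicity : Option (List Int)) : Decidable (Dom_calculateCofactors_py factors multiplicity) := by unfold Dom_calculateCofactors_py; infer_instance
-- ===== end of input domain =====

-- B replaces A's rebuild-the-whole-cofactor-list-per-factor loop by a single pass over
-- prefix/suffix products of factor^multiplicity (objective: faster; neither version mutates its arguments).


-- ===== PORT A =====
-- literal transliteration of A; multiplicity[i] is pyGetD (in range under Pre_),
-- factor**(r-1) is ^(r-1).toNat (r ≥ 1 under Pre_, so no negative exponent).
def calculateCofactors_py (factors : List Int) (multiplicity : Option (List Int)) : List Int :=
  let n := factors.length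
  let mult := multiplicity.getD (List.replicate n 1)
  (PySem.List.enumerate factors).foldl
    (fun cofactors iv =>
      let r := PySem.List.pyGetD mult iv.1 1
      let fdiag := iv.2 ^ (r - 1).toNat
      let fnondiag := fdiag * iv.2
      (PySem.List.enumerate cofactors).map
        (fun jx => jx.2 * (if iv.1 ≠ jx.1 then fnondiag else fdiag)))
    (List.replicate n (1 : Int))

-- ===== PORT B =====
-- transliteration of Source B; the two append-accumulate loops are List.scanl (same values).
def calculateCofactors_py_alt (factors : List Int) (multiplicity : Option (List Int)) : List Int :=
  let n := factors.length
  let mult := multiplicity.getD (List.replicate n 1)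
  let powers := List.zipWith (fun f r => f ^ r.toNat) factors mult
  let pfx := powers.scanl (· * ·) 1
  let sfx := (powers.reverse.scanl (· * ·) 1).reverse
  (List.range n).map
    (fun j => pfx.getD j 1 * sfx.getD (j + 1) 1 *
              (factors.getD j 0) ^ ((mult.getD j 1) - 1).toNat)

-- ===== PRECONDITION & SPEC =====
-- Pre_ excludes exactly the inputs where Python A does not return an int tuple: a provided
-- multiplicity shorter than factors (IndexError) or with an entry < 1 among the first n
-- (factor**negative gives a float, or ZeroDivisionError for factor 0).
def Pre_calculateCofactors_py (factors : List Int) (multiplicity : Option (List Int)) : Prop :=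
  ((multiplicity.map (fun m => decide (factors.length ≤ m.length) &&
      (m.take factors.length).all (fun r => decide (1 ≤ r)))).getD true) = true
instance (factors : List Int) (multiplicity : Option (List Int)) : Decidable (Pre_calculateCofactors_py factors multiplicity) := by unfold Pre_calculateCofactors_py; infer_instance

def pvWitness_calculateCofactors_py : List Int × Option (List Int) := ([2, 3, 5, 7], some [2, 1, 2, 1])

def Spec_calculateCofactors_py (factors : List Int) (multiplicity : Option (List Int)) (out : List Int) : Prop := out = calculateCofactors_py_alt factors multiplicity
instance (factors : List Int) (multiplicity : Option (List Int)) (out : List Int) : Decidable (Spec_calculateCofactors_py factors multiplicity out) := by unfold Spec_calculateCofactors_py; infer_instance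

-- ===== CLAIM (what is proved, stated in full; the proofs are below) =====
def Claim_equal_calculateCofactors_py : Prop := ∀ (factors : List Int) (multiplicity : Option (List Int)), Dom_calculateCofactors_py factors multiplicity → Pre_calculateCofactors_py factors multiplicity → Spec_calculateCofactors_py factors multiplicity (calculateCofactors_py factors multiplicity)

-- ===== LEMMAS AND PROOFS =====

def pvW (mult : List Int) (i f j : Int) : Int :=
  if i ≠ j then f ^ ((PySem.List.pyGetD mult i 1) - 1).toNat * f
  else f ^ ((PySem.List.pyGetD mult i 1) - 1).toNat

theorem pvEnumMap {α β : Type} (xs : List α) (g : α → β) (s : Int) :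
    PySem.List.enumerate (xs.map g) s = (PySem.List.enumerate xs s).map (fun p => (p.1, g p.2)) := by
  induction xs generalizing s with
  | nil => simp [PySem.List.enumerate_nil]
  | cons x xs ih => simp [PySem.List.enumerate_cons, ih]

theorem pvEnumEnum {α : Type} (xs : List α) (s : Int) :
    PySem.List.enumerate (PySem.List.enumerate xs s) s
      = (PySem.List.enumerate xs s).map (fun p => (p.1, p)) := by
  induction xs generalizing s with
  | nil => simp [PySem.List.enumerate_nil]
  | cons x xs ih => simp [PySem.List.enumerate_cons, ih]

theorem pvEnumGetD {α β : Type} (xs : List α) (d : α) (h : Int × α → β) (s : Int) :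
    (PySem.List.enumerate xs s).map h =
      (List.range xs.length).map (fun k : Nat => h (s + (k : Int), xs.getD k d)) := by
  induction xs generalizing s with
  | nil => simp [PySem.List.enumerate_nil]
  | cons x xs ih =>
    rw [PySem.List.enumerate_cons, List.map_cons, ih (s+1)]
    simp only [List.length_cons, List.range_succ_eq_map, List.map_cons, List.map_map]
    refine congrArg₂ _ (by simp) ?_
    refine List.map_congr_left (fun k _ => ?_)
    simp [Function.comp, Nat.succ_eq_add_one]
    congr 2
    ring

theorem pvLoopA (mult fs : List Int) (s : Int) (cof : List Int) :
    (PySem.List.enumerate fs s).foldl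
      (fun cofactors iv =>
        let r := PySem.List.pyGetD mult iv.1 1
        let fdiag := iv.2 ^ (r - 1).toNat
        let fnondiag := fdiag * iv.2
        (PySem.List.enumerate cofactors).map
          (fun jx => jx.2 * (if iv.1 ≠ jx.1 then fnondiag else fdiag))) cof
    = (PySem.List.enumerate cof).map
        (fun jx => jx.2 * ((PySem.List.enumerate fs s).map (fun iv => pvW mult iv.1 iv.2 jx.1)).prod) := by
  induction fs generalizing s cof with
  | nil => simp [PySem.List.enumerate_nil, PySem.List.map_snd_enumerate]
  | cons f fs ih =>
    rw [PySem.List.enumerate_cons, List.foldl_cons, ih]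
    simp only []
    rw [pvEnumMap, pvEnumEnum, List.map_map, List.map_map]
    refine List.map_congr_left (fun p _ => ?_)
    simp only [Function.comp, List.map_cons, List.prod_cons, pvW]
    ring_nf

theorem pvScanlGetD (xs : List Int) (a : Int) (j : Nat) (hj : j ≤ xs.length) :
    (xs.scanl (· * ·) a).getD j 1 = a * (xs.take j).prod := by
  induction xs generalizing a j with
  | nil => simp_all
  | cons x xs ih =>
    cases j with
    | zero => simp
    | succ j =>
      simp only [List.scanl_cons, List.getD_cons_succ, List.take_succ_cons, List.prod_cons]
      rw [ih (a * x) j (by simpa using hj)]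
      ring

theorem pvTakeEqRangeMap (xs : List Int) (j : Nat) (hj : j ≤ xs.length) :
    xs.take j = (List.range j).map (fun k => xs.getD k 1) := by
  induction xs generalizing j with
  | nil => simp_all
  | cons x xs ih =>
    cases j with
    | zero => simp
    | succ j =>
      rw [List.take_succ_cons, List.range_succ_eq_map, List.map_cons,
        ih j (by simpa using hj), List.map_map]
      simp [Function.comp]

theorem pvSuffixGetD (ps : List Int) (i : Nat) (hi : i ≤ ps.length) :
    ((ps.reverse.scanl (· * ·) 1).reverse).getD i 1 = (ps.drop i).prod := by
  have hlen : (ps.reverse.scanl (· * ·) 1).length = ps.length + 1 := by simp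
  rw [List.getD_reverse i (by omega), hlen]
  have h1 : ps.length + 1 - 1 - i = ps.length - i := by omega
  rw [h1, pvScanlGetD _ _ _ (by simp), List.take_reverse]
  have h2 : ps.length - (ps.length - i) = i := by omega
  rw [h2, List.prod_reverse, one_mul]

theorem pvGetDDrop (ps : List Int) (c u : Nat) :
    (ps.drop c).getD u 1 = ps.getD (c + u) 1 := by
  simp [List.getD_eq_getElem?_getD, List.getElem?_drop]

theorem pvIndex (factors mult : List Int)
    (hm : factors.length ≤ mult.length)
    (hpos : ∀ k < factors.length, 1 ≤ mult.getD k 1)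
    (j : Nat) (hj : j < factors.length) :
    ((List.range factors.length).map
        (fun t : Nat => pvW mult (t : Int) (factors.getD t 0) (j : Int))).prod
      = ((List.zipWith (fun f r => f ^ r.toNat) factors mult).take j).prod *
        ((List.zipWith (fun f r => f ^ r.toNat) factors mult).drop (j+1)).prod *
        (factors.getD j 0) ^ ((mult.getD j 1) - 1).toNat := by
  set ps := List.zipWith (fun f r => f ^ r.toNat) factors mult with hps
  have hlps : ps.length = factors.length := by
    simp [hps]; omega
  -- entries of ps
  have hent : ∀ t, t < factors.length → ps.getD t 1 =
      (factors.getD t 0) ^ ((mult.getD t 1) - 1).toNat * factors.getD t 0 := by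
    intro t ht
    have ht' : t < ps.length := by omega
    have htm : t < mult.length := by omega
    rw [List.getD_eq_getElem ps 1 ht', List.getD_eq_getElem factors 0 ht,
      List.getD_eq_getElem mult 1 htm]
    simp only [hps, List.getElem_zipWith]
    have h1 : 1 ≤ mult[t] := by
      have := hpos t ht
      rwa [List.getD_eq_getElem mult 1 htm] at this
    have : (mult[t]).toNat = (mult[t] - 1).toNat + 1 := by omega
    rw [this, pow_succ]
  have hsplit : factors.length = j + (1 + (factors.length - j - 1)) := by omega
  rw [hsplit]
  simp only [List.range_add, List.map_append, List.prod_append, List.map_map]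
  have hA1 : ((List.range j).map
      (fun t : Nat => pvW mult (t : Int) (factors.getD t 0) (j : Int))).prod
      = (ps.take j).prod := by
    rw [pvTakeEqRangeMap ps j (by omega)]
    refine congrArg _ (List.map_congr_left (fun t htm => ?_))
    have ht : t < j := List.mem_range.mp htm
    have hne : (t : Int) ≠ (j : Int) := by omega
    rw [pvW, if_pos hne]
    simp only [PySem.List.pyGetD_natCast]
    rw [hent t (by omega)]
  have hA2 : ((List.range 1).map
      ((fun t : Nat => pvW mult (t : Int) (factors.getD t 0) (j : Int)) ∘ (fun x => j + x))).prod
      = (factors.getD j 0) ^ ((mult.getD j 1) - 1).toNat := by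
    simp only [List.range_one, List.map_cons, List.map_nil, List.prod_cons, List.prod_nil,
      Function.comp, Nat.add_zero, mul_one]
    rw [pvW, if_neg (by simp)]
    simp only [PySem.List.pyGetD_natCast]
  have hA3 : ((List.range (factors.length - j - 1)).map
      ((fun t : Nat => pvW mult (t : Int) (factors.getD t 0) (j : Int)) ∘ (fun x => j + x) ∘ (fun x => 1 + x))).prod
      = (ps.drop (j+1)).prod := by
    have hlen : (ps.drop (j+1)).length = factors.length - j - 1 := by
      simp [hlps]; omega
    have heq : ps.drop (j+1) = (ps.drop (j+1)).take (factors.length - j - 1) := by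
      rw [← hlen, List.take_length]
    rw [heq, pvTakeEqRangeMap _ _ (by omega)]
    refine (congrArg List.prod (List.map_congr_left (fun t htm => ?_))).symm
    have ht : t < factors.length - j - 1 := List.mem_range.mp htm
    simp only [Function.comp]
    have hne : ((j + (1 + t) : Nat) : Int) ≠ (j : Int) := by push_cast; omega
    rw [pvW, if_pos hne]
    simp only [PySem.List.pyGetD_natCast]
    rw [pvGetDDrop]
    have harg : j + 1 + t = j + (1 + t) := by omega
    rw [harg, hent (j + (1 + t)) (by omega)]
  rw [hA1, hA2, hA3]
  ring


theorem calculateCofactors_witness_ok :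
    Dom_calculateCofactors_py pvWitness_calculateCofactors_py.1 pvWitness_calculateCofactors_py.2 ∧
    Pre_calculateCofactors_py pvWitness_calculateCofactors_py.1 pvWitness_calculateCofactors_py.2 := by
  constructor <;> decide

-- ===== VERDICT (by name: the statement is the Claim_ definition above) =====
theorem calculateCofactors_py_spec : Claim_equal_calculateCofactors_py := by
  intro factors multiplicity hdom hpre
  unfold Spec_calculateCofactors_py calculateCofactors_py calculateCofactors_py_alt
  dsimp only
  have hmp : ∀ k, k < factors.length →
      1 ≤ (multiplicity.getD (List.replicate factors.length 1)).getD k 1 := by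
    intro k hk
    cases multiplicity with
    | none =>
      simp [List.getD_eq_getElem?_getD, hk]
    | some m =>
      simp only [Pre_calculateCofactors_py, Option.map_some, Option.getD_some,
        Bool.and_eq_true, decide_eq_true_eq, List.all_eq_true] at hpre
      have hkm : k < m.length := by omega
      have : m[k] ∈ m.take factors.length := by
        have : (m.take factors.length)[k]'(by simp; omega) = m[k] := List.getElem_take
        exact this ▸ List.getElem_mem _
      simp only [Option.getD_some]
      rw [List.getD_eq_getElem m 1 hkm]
      exact hpre.2 _ this
  have hml : factors.length ≤ (multiplicity.getD (List.replicate factors.length 1)).length := by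
    cases multiplicity with
    | none => simp
    | some m =>
      simp only [Pre_calculateCofactors_py, Option.map_some, Option.getD_some,
        Bool.and_eq_true, decide_eq_true_eq] at hpre
      simpa using hpre.1
  rw [pvLoopA]
  rw [pvEnumGetD (List.replicate factors.length (1 : Int)) 1 _ 0]
  simp only [List.length_replicate]
  refine List.map_congr_left (fun j hjm => ?_)
  have hj : j < factors.length := List.mem_range.mp hjm
  have hrep : (List.replicate factors.length (1 : Int)).getD j 1 = 1 := by
    simp [List.getD_eq_getElem?_getD, hj]
  rw [hrep, one_mul]
  simp only [zero_add]
  rw [pvEnumGetD factors 0 _ 0]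
  simp only [zero_add]
  rw [pvIndex factors _ hml hmp j hj]
  have hlps : (List.zipWith (fun f r => f ^ r.toNat) factors
      (multiplicity.getD (List.replicate factors.length 1))).length = factors.length := by
    simp; omega
  rw [pvScanlGetD _ _ j (by omega), pvSuffixGetD _ (j+1) (by omega), one_mul]
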